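-- pv_equiv track=rewrite | github.com/jfhbuist/advent-of-code-2022 | src/day_1.py | sort_calories
-- ===== SOURCE A (Python) =====
-- def sort_calories(current_cal, elf_idx, max_cal, max_idx):
--     for pos, cal in enumerate(max_cal):
--         if current_cal > cal:
--             # shift entries right and insert removed value at current position
--             max_cal.insert(pos, max_cal.pop())
--             max_idx.insert(pos, max_idx.pop())
--             # replace inserted value with new current cal value
--             max_cal[pos] = current_cal
--             max_idx[pos] = elf_idx
--             break
--     return max_cal, max_idx
-- ===== SOURCE B (Python) =====
-- def sort_calories(current_cal, elf_idx, max_cal, max_idx):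
--     def place(cals, idxs):
--         # structural recursion on cals: returns (new_cals, new_idxs, inserted);
--         # the new entry is placed where the head is beaten, and [:-1] there
--         # drops the overflowing last element of each list in the same step
--         if not cals:
--             return cals, idxs, False
--         if current_cal > cals[0]:
--             return [current_cal] + cals[:-1], [elf_idx] + idxs[:-1], True
--         tail_c, tail_i, done = place(cals[1:], idxs[1:])
--         if not done:
--             return cals, idxs, False
--         return cals[:1] + tail_c, idxs[:1] + tail_i, True
--
--     new_cal, new_idx, _ = place(max_cal, max_idx)
--     max_cal[:] = new_cal
--     max_idx[:] = new_idx
--     return max_cal, max_idx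
-- ===== Notes on version B (the rewrite author's own statement) =====
-- stated objective: alternative
-- what changed: B abandons A's index loop with pop/insert/in-place overwrite and instead rebuilds both lists by one pure structural recursion over the pair of lists that fuses the placement and the dropping of the overflow element at the match point (no positions, no enumerate, no mutation during the pass); the final lists are assigned back in place.
import Mathlib
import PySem

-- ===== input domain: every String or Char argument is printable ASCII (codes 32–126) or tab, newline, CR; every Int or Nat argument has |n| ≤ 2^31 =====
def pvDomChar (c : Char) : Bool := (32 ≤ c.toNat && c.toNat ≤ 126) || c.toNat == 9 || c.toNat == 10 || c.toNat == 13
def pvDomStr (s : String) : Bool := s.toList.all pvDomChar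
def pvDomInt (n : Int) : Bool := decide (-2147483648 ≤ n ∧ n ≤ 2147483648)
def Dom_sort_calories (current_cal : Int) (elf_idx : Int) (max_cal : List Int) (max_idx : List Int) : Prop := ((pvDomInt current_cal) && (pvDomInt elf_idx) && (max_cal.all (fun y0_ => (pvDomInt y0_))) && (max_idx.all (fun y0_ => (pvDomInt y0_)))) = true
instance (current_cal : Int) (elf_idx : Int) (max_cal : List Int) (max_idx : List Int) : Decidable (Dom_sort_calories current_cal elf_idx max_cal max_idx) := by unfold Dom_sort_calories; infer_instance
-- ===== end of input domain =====

-- B replaces A's index loop with pop/insert/overwrite mutation by one pure structural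
-- recursion over the pair of lists that places the new entry and drops the overflow in
-- the same step (alternative decomposition, same cost class); both Pythons mutate the
-- lists in place, the equivalence proved here is about the return value.

-- ===== PORT A =====
-- the 'for pos, cal in enumerate(max_cal): if current_cal > cal: … break' loop;
-- mc/mi are the full lists being mutated, rest is the (unvisited) suffix of mc
def sortCalLoopA (current_cal : Int) (elf_idx : Int) (mc : List Int) (mi : List Int) :
    Nat → List Int → List Int × List Int
  | _, [] => (mc, mi)
  | pos, cal :: rest =>
    if current_cal > cal then
      -- max_cal.insert(pos, max_cal.pop()): pop the last element (mc ≠ [] here: it contains cal),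
      -- insert it at pos
      let mc1 := PySem.List.insert mc.dropLast (pos : Int) (mc.getLastD 0)
      -- max_cal[pos] = current_cal  (pos < len: in range)
      let mc2 := PySem.List.pySetD mc1 (pos : Int) current_cal
      -- max_idx.pop() raises IndexError when mi = [], and max_idx[pos] = elf_idx raises
      -- when pos ≥ len mi: both excluded by Pre_sort_calories
      let mi1 := PySem.List.insert mi.dropLast (pos : Int) (mi.getLastD 0)
      let mi2 := PySem.List.pySetD mi1 (pos : Int) elf_idx
      (mc2, mi2)
    else sortCalLoopA current_cal elf_idx mc mi (pos + 1) rest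

def sort_calories (current_cal : Int) (elf_idx : Int) (max_cal : List Int) (max_idx : List Int) : List Int × List Int :=
  sortCalLoopA current_cal elf_idx max_cal max_idx 0 max_cal

-- ===== PORT B =====
-- place(cals, idxs): structural recursion on cals returning (new_cals, new_idxs, inserted)
def placeB (current_cal : Int) (elf_idx : Int) : List Int → List Int → List Int × List Int × Bool
  | [], idxs => ([], idxs, false)
  | c :: cs, idxs =>
    if current_cal > c then
      -- [current_cal] + cals[:-1], [elf_idx] + idxs[:-1], True
      (current_cal :: PySem.List.slice (c :: cs) none (some (-1)),
       elf_idx :: PySem.List.slice idxs none (some (-1)), true)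
    else
      -- tail_c, tail_i, done = place(cals[1:], idxs[1:])
      let r := placeB current_cal elf_idx cs (PySem.List.slice idxs (some 1) none)
      if r.2.2 then
        -- cals[:1] + tail_c, idxs[:1] + tail_i, True
        (PySem.List.slice (c :: cs) none (some 1) ++ r.1,
         PySem.List.slice idxs none (some 1) ++ r.2.1, true)
      else (c :: cs, idxs, false)

def sort_calories_alt (current_cal : Int) (elf_idx : Int) (max_cal : List Int) (max_idx : List Int) : List Int × List Int :=
  let r := placeB current_cal elf_idx max_cal max_idx
  (r.1, r.2.1)

-- ===== PRECONDITION & SPEC =====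
-- Pre_ excludes exactly the inputs on which A raises (IndexError): an insertion position
-- pos exists in max_cal but pos ≥ len max_idx.
def Pre_sort_calories (current_cal : Int) (elf_idx : Int) (max_cal : List Int) (max_idx : List Int) : Prop :=
  (match max_cal.findIdx? (fun c => current_cal > c) with
   | none => true
   | some p => decide (p < max_idx.length)) = true
instance (current_cal : Int) (elf_idx : Int) (max_cal : List Int) (max_idx : List Int) : Decidable (Pre_sort_calories current_cal elf_idx max_cal max_idx) := by unfold Pre_sort_calories; infer_instance

def pvWitness_sort_calories : Int × Int × List Int × List Int := (7, 3, [10, 6, 2], [0, 1, 2])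

def Spec_sort_calories (current_cal : Int) (elf_idx : Int) (max_cal : List Int) (max_idx : List Int) (out : List Int × List Int) : Prop := out = sort_calories_alt current_cal elf_idx max_cal max_idx
instance (current_cal : Int) (elf_idx : Int) (max_cal : List Int) (max_idx : List Int) (out : List Int × List Int) : Decidable (Spec_sort_calories current_cal elf_idx max_cal max_idx out) := by unfold Spec_sort_calories; infer_instance

-- ===== CLAIM (what is proved, stated in full; the proofs are below) =====
def Claim_equal_sort_calories : Prop := ∀ (current_cal : Int) (elf_idx : Int) (max_cal : List Int) (max_idx : List Int), Dom_sort_calories current_cal elf_idx max_cal max_idx → Pre_sort_calories current_cal elf_idx max_cal max_idx → Spec_sort_calories current_cal elf_idx max_cal max_idx (sort_calories current_cal elf_idx max_cal max_idx)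

-- ===== LEMMAS AND PROOFS =====

-- proof-side helper: the first position (from start n) whose entry current_cal beats
def fsp (cc : Int) : Nat → List Int → Option Nat
  | _, [] => none
  | p, c :: rest => if cc > c then some p else fsp cc (p + 1) rest

lemma fsp_eq_findIdx? (cc : Int) (l : List Int) : ∀ n : Nat,
    fsp cc n l = (l.findIdx? (fun c => cc > c)).map (· + n) := by
  induction l with
  | nil => intro n; simp [fsp]
  | cons c rest ih =>
    intro n
    by_cases h : cc > c
    · simp [fsp, List.findIdx?_cons, h]
    · simp only [fsp, List.findIdx?_cons, decide_eq_true_eq, h,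
        if_false, ih (n + 1), Option.map_map]
      congr 1
      funext k
      simp
      omega

lemma findIdx?_lt_length {cc : Int} {l : List Int} {p : Nat}
    (h : l.findIdx? (fun c => cc > c) = some p) : p < l.length := by
  exact List.findIdx?_eq_some_iff_findIdx_eq.mp h |>.1

-- A's loop, when no position in the remaining suffix qualifies, returns the lists unchanged
lemma loopA_none (cc ei : Int) (mc mi : List Int) (rest : List Int) : ∀ n : Nat,
    fsp cc n rest = none →
    sortCalLoopA cc ei mc mi n rest = (mc, mi) := by
  induction rest with
  | nil => intro n _; simp [sortCalLoopA]
  | cons c rest ih =>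
    intro n h
    simp only [fsp] at h
    by_cases hc : cc > c
    · simp [hc] at h
    · simp only [sortCalLoopA, if_neg hc]
      exact ih (n + 1) (by simpa [hc] using h)

-- A's loop, when the first qualifying position is p, performs the pop/insert/set step at p
lemma loopA_some (cc ei : Int) (mc mi : List Int) (rest : List Int) : ∀ (n p : Nat),
    fsp cc n rest = some p →
    sortCalLoopA cc ei mc mi n rest =
      (PySem.List.pySetD (PySem.List.insert mc.dropLast (p : Int) (mc.getLastD 0)) (p : Int) cc,
       PySem.List.pySetD (PySem.List.insert mi.dropLast (p : Int) (mi.getLastD 0)) (p : Int) ei) := by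
  induction rest with
  | nil => intro n p h; simp [fsp] at h
  | cons c rest ih =>
    intro n p h
    simp only [fsp] at h
    by_cases hc : cc > c
    · simp only [if_pos hc, Option.some.injEq] at h
      subst h
      simp [sortCalLoopA, hc]
    · simp only [sortCalLoopA, if_neg hc]
      exact ih (n + 1) p (by simpa [hc] using h)

-- the pop/insert/set step on one list equals the canonical take/drop form, whenever p is in range
lemma step_eq_canon (l : List Int) (p : Nat) (v : Int) (hp : p < l.length) :
    PySem.List.pySetD (PySem.List.insert l.dropLast (p : Int) (l.getLastD 0)) (p : Int) v =
      l.take p ++ v :: l.dropLast.drop p := by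
  have hlen : l.dropLast.length = l.length - 1 := by simp
  have hple : p ≤ l.dropLast.length := by omega
  rw [PySem.List.insert_natCast l.dropLast p _ hple, PySem.List.pySetD_natCast]
  have hlt : (l.dropLast.take p).length = p := by simp; omega
  rw [show (l.dropLast.take p ++ l.getLastD 0 :: l.dropLast.drop p).set p v =
        l.dropLast.take p ++ v :: l.dropLast.drop p by
      rw [List.set_append_right _ _ (by omega)]
      simp [hlt]]
  have h1 : l.dropLast.take p = l.take p := by
    rw [List.dropLast_eq_take, List.take_take]
    congr 1; omega
  rw [h1]

-- B's recursion, when no entry qualifies, returns both lists unchanged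
lemma placeB_none (cc ei : Int) (l : List Int) :
    ∀ ids : List Int, l.findIdx? (fun c => cc > c) = none →
    placeB cc ei l ids = (l, ids, false) := by
  induction l with
  | nil => intro ids _; simp [placeB]
  | cons c cs ih =>
    intro ids h
    rw [List.findIdx?_cons] at h
    by_cases hc : cc > c
    · simp [hc] at h
    · simp only [hc, decide_false, Bool.false_eq_true, if_false] at h
      simp [placeB, if_neg hc,
        ih (PySem.List.slice ids (some 1) none) (by simpa using h)]

-- B's recursion, when the first qualifying position is p (in range in ids),
-- returns the canonical take/drop form
lemma placeB_some (cc ei : Int) (l : List Int) :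
    ∀ (ids : List Int) (p : Nat), l.findIdx? (fun c => cc > c) = some p → p < ids.length →
    placeB cc ei l ids =
      (l.take p ++ cc :: l.dropLast.drop p, ids.take p ++ ei :: ids.dropLast.drop p, true) := by
  induction l with
  | nil => intro ids p h _; simp at h
  | cons c cs ih =>
    intro ids p h hp
    rw [List.findIdx?_cons] at h
    by_cases hc : cc > c
    · simp only [hc, decide_true, if_true, Option.some.injEq] at h
      subst h
      simp [placeB, hc, PySem.List.slice_to_neg_one]
    · simp only [hc, decide_false, Bool.false_eq_true, if_false] at h
      rcases Option.map_eq_some_iff.mp h with ⟨k, hfs, hk⟩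
      rcases p with _ | q
      · exfalso; omega
      · have hq : cs.findIdx? (fun c => decide (cc > c)) = some q := by
          rw [hfs]; congr 1; omega
        rcases ids with _ | ⟨j, ids'⟩
        · simp at hp
        · have hq' : q < ids'.length := by simp at hp; omega
          simp only [placeB, if_neg hc, PySem.List.slice_from_one, List.tail_cons,
            ih ids' q hq hq']
          have hcs : cs ≠ [] := by
            intro hnil; rw [hnil] at hq; simp at hq
          have hids' : ids' ≠ [] := by
            intro hnil; rw [hnil] at hq'; simp at hq'
          simp [PySem.List.slice_to, List.dropLast_cons_of_ne_nil, hcs, hids']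

lemma main_eq (cc ei : Int) (mc mi : List Int)
    (hpre : Pre_sort_calories cc ei mc mi) :
    sort_calories cc ei mc mi = sort_calories_alt cc ei mc mi := by
  unfold sort_calories sort_calories_alt
  rcases hfi : mc.findIdx? (fun c => cc > c) with _ | p
  · have hfs : fsp cc 0 mc = none := by rw [fsp_eq_findIdx?, hfi]; rfl
    rw [loopA_none cc ei mc mi mc 0 hfs, placeB_none cc ei mc mi hfi]
  · have hfs : fsp cc 0 mc = some p := by rw [fsp_eq_findIdx?, hfi]; simp
    have hpc : p < mc.length := findIdx?_lt_length hfi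
    have hpi : p < mi.length := by
      unfold Pre_sort_calories at hpre
      rw [hfi] at hpre
      simpa using hpre
    rw [loopA_some cc ei mc mi mc 0 p hfs, step_eq_canon mc p cc hpc,
      step_eq_canon mi p ei hpi, placeB_some cc ei mc mi p hfi hpi]

-- ===== VERDICT (by name: the statement is the Claim_ definition above) =====
theorem sort_calories_spec : Claim_equal_sort_calories := by
  intro cc ei mc mi _ hpre
  unfold Spec_sort_calories
  exact main_eq cc ei mc mi hpre
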